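-- pv_equiv track=rewrite | github.com/fxbp/spd-ex1 | polybios.py | construeixTaula
-- ===== SOURCE A (Python) =====
-- L = 26 # nombre caràcters alfabet
--
-- def construeixTaula(files,columnes):
--     taula = [['0' for x in range(columnes)] for y in range(files)]
--     num_lletra = 0;
--     total_taula=files*columnes;
--     # Es podria genererar la taula de forma més simple però:
--     # S'ha de tenir en compte que hi poden haver col·lisions de lletres si la dimensió de la taula és < 26
--     # També s'ha de controlar que no posi més caràcters si la taula te dimensió > 26
--     for i in range(files):
--         for j in range(columnes):
--             if num_lletra < L:
--                 caracter =chr(ord('a')+num_lletra)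
--                 if caracter == 'i' and total_taula < L:
--                     taula[i][j]="ij"
--                     num_lletra += 2
--                 else:
--                     taula[i][j] = caracter
--                     num_lletra += 1
--
--     return taula
-- ===== SOURCE B (Python) =====
-- def construeixTaula(files, columnes):
--     # Staged construction: build the flat row-major cell sequence once
--     # (letters, with 'i'/'j' merged to 'ij' when the grid has fewer than 26
--     # cells, padded with '0' up to the cell count), then cut it into rows of
--     # `columnes` cells at a moving offset.
--     letters = [chr(c) for c in range(97, 123)]
--     if files * columnes < 26:
--         letters[8:10] = ['ij']
--     cells = max(files, 0) * max(columnes, 0)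
--     flat = (letters + ['0'] * cells)[:cells]
--     taula = []
--     pos = 0
--     for _ in range(files):
--         taula.append(flat[pos:pos + columnes])
--         pos += columnes
--     return taula
-- ===== Notes on version B (the rewrite author's own statement) =====
-- stated objective: alternative
-- what changed: B replaces A's in-place mutation of a pre-allocated 2D grid driven by a stateful letter counter inside nested loops with a staged pipeline: build the flat row-major token sequence once (letters with 'i'/'j' merged to 'ij' when the grid has fewer than 26 cells, padded with '0' to the cell count), then cut it into rows by repeatedly slicing off the first `columnes` items.
import Mathlib
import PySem

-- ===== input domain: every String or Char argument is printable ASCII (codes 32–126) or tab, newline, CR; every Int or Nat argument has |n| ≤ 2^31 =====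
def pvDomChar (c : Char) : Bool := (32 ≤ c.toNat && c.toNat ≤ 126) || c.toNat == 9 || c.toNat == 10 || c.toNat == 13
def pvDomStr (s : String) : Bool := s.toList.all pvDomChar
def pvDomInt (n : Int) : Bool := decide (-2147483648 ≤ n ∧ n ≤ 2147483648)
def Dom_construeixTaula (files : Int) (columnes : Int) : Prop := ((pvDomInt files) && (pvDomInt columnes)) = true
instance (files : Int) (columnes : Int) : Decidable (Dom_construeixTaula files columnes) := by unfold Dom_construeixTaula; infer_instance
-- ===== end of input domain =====

-- B builds the flat row-major token sequence once (letters, 'ij' merged when < 26 cells,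
-- padded with '0') and cuts it into rows by repeated slicing, instead of A's stateful
-- letter-counter nested loops mutating a pre-allocated grid (objective: alternative).

-- ===== PORT A =====
-- taula[i][j] = v  (i, j always in range when A executes it)
def pySetCell (taula : List (List String)) (i j : Int) (v : String) : List (List String) :=
  PySem.List.pySetD taula i (PySem.List.pySetD (PySem.List.pyGetD taula i []) j v)

-- the body of A's inner loop, as a helper (state = (taula, num_lletra));
-- 'caracter = chr(ord('a')+num_lletra)' is ported as String.mk [Char.ofNat ('a'.toNat + st.2.toNat)]
def stepA (total_taula : Int) (i : Int) (st : List (List String) × Int) (j : Int) :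
    List (List String) × Int :=
  if st.2 < 26 then
    if String.mk [Char.ofNat ('a'.toNat + st.2.toNat)] = "i" ∧ total_taula < 26 then
      (pySetCell st.1 i j "ij", st.2 + 2)
    else
      (pySetCell st.1 i j (String.mk [Char.ofNat ('a'.toNat + st.2.toNat)]), st.2 + 1)
  else st

def construeixTaula (files : Int) (columnes : Int) : List (List String) :=
  let taula : List (List String) :=
    (PySem.List.pyRange 0 files 1).map (fun _ =>
      (PySem.List.pyRange 0 columnes 1).map (fun _ => "0"))
  let total_taula := files * columnes
  ((PySem.List.pyRange 0 files 1).foldl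
      (fun st i => (PySem.List.pyRange 0 columnes 1).foldl (fun st j => stepA total_taula i st j) st)
      (taula, (0 : Int))).1

-- ===== PORT B =====
-- ['0'] * cells and the slices: cells ≥ 0 always, so List.replicate cells.toNat is exact;
-- flat[:c] / flat[c:] are PySem.List.slice (Python-exact, including negative bounds).
def construeixTaula_alt (files : Int) (columnes : Int) : List (List String) :=
  let letters0 : List String :=
    (PySem.List.pyRange 97 123 1).map (fun c => String.mk [Char.ofNat c.toNat])
  let letters : List String :=
    if files * columnes < 26 then letters0.take 8 ++ ["ij"] ++ letters0.drop 10 else letters0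
  let cells : Int := max files 0 * max columnes 0
  let flat : List String :=
    PySem.List.slice (letters ++ List.replicate cells.toNat "0") none (some cells)
  ((PySem.List.pyRange 0 files 1).foldl
      (fun st _ =>
        (st.1 ++ [PySem.List.slice flat (some st.2) (some (st.2 + columnes))],
         st.2 + columnes))
      (([] : List (List String)), (0 : Int))).1

-- ===== PRECONDITION & SPEC =====
def Spec_construeixTaula (files : Int) (columnes : Int) (out : List (List String)) : Prop := out = construeixTaula_alt files columnes
instance (files : Int) (columnes : Int) (out : List (List String)) : Decidable (Spec_construeixTaula files columnes out) := by unfold Spec_construeixTaula; infer_instance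

-- ===== CLAIM (what is proved, stated in full; the proofs are below) =====
def Claim_equal_construeixTaula : Prop := ∀ (files : Int) (columnes : Int), Dom_construeixTaula files columnes → Spec_construeixTaula files columnes (construeixTaula files columnes)

-- ===== LEMMAS AND PROOFS =====

-- the token list of B (c = true ⇔ the grid has < 26 cells, so 'i'/'j' are merged)
def Tok (c : Bool) : List String :=
  if c then ["a","b","c","d","e","f","g","h","ij","k","l","m","n","o","p","q","r","s","t","u","v","w","x","y","z"]
  else ["a","b","c","d","e","f","g","h","i","j","k","l","m","n","o","p","q","r","s","t","u","v","w","x","y","z"]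

def cellVal (c : Bool) (k : Nat) : String := (Tok c).getD k "0"

-- A's num_lletra after the first k cells (row-major) have been processed
def numAt (c : Bool) (k : Nat) : Int :=
  if c then (if k ≤ 8 then (k : Int) else (k : Int) + 1) else min (k : Int) 26

-- the grid after the first k cells have been filled
def gridAt (c : Bool) (F C k : Nat) : List (List String) :=
  (List.range F).map (fun i => (List.range C).map (fun j =>
    if i * C + j < k then cellVal c (i * C + j) else "0"))

-- row i of the finished grid
def rowB (c : Bool) (C i : Nat) : List String := (List.range' (i * C) C).map (cellVal c)

lemma cell_inj (C i j i' j' : Nat) (hj : j < C) (hj' : j' < C)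
    (h : i' * C + j' = i * C + j) : i' = i ∧ j' = j := by
  have hC : 0 < C := Nat.lt_of_le_of_lt (Nat.zero_le _) hj
  have h1 : (C * i' + j') / C = i' := by
    simp [Nat.mul_add_div hC, Nat.div_eq_of_lt hj']
  have h2 : (C * i + j) / C = i := by
    simp [Nat.mul_add_div hC, Nat.div_eq_of_lt hj]
  have hii : i' = i := by
    rw [← h1, ← h2, Nat.mul_comm C i', Nat.mul_comm C i, h]
  refine ⟨hii, ?_⟩
  rw [hii] at h
  omega

lemma cellVal_ge (c : Bool) (k : Nat) (h : (Tok c).length ≤ k) : cellVal c k = "0" := by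
  have := List.getElem?_eq_none (l := Tok c) (i := k) h
  simp [cellVal, List.getD, this]

lemma char_eq_i (k : Nat) (h : k < 25) :
    (String.mk [Char.ofNat ('a'.toNat + (numAt true k).toNat)] = "i") ↔ k = 8 := by
  interval_cases k <;> decide

lemma cellVal_true_ne8 (k : Nat) (h : k < 25) (h8 : k ≠ 8) :
    cellVal true k = String.mk [Char.ofNat ('a'.toNat + (numAt true k).toNat)] := by
  interval_cases k <;> first | decide | omega

lemma cellVal_false_lt (k : Nat) (h : k < 26) :
    cellVal false k = String.mk [Char.ofNat ('a'.toNat + (numAt false k).toNat)] := by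
  interval_cases k <;> decide

-- per-cell step, write case
lemma stepA_eq_write (total i j : Int) (M : List (List String)) (c : Bool) (k : Nat)
    (hc : c = decide (total < 26)) (h1 : c = true → k < 25) (h2 : c = false → k < 26) :
    stepA total i (M, numAt c k) j = (pySetCell M i j (cellVal c k), numAt c (k + 1)) := by
  cases c with
  | false =>
    have hk := h2 rfl
    have hng : ¬ total < 26 := by
      intro hlt; simp [hlt] at hc
    have hguard : numAt false k < 26 := by simp [numAt]; omega
    simp only [stepA]
    rw [if_pos hguard, if_neg (fun hcc => hng hcc.2), ← cellVal_false_lt k hk,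
      show numAt false k + 1 = numAt false (k + 1) by simp [numAt]; omega]
  | true =>
    have hk := h1 rfl
    have hlt : total < 26 := by
      by_contra hng; simp [hng] at hc
    have hguard : numAt true k < 26 := by simp [numAt]; split_ifs <;> omega
    simp only [stepA]
    rw [if_pos hguard]
    by_cases h8 : k = 8
    · subst h8
      rw [if_pos ⟨by decide, hlt⟩,
        show numAt true 8 + 2 = numAt true 9 by decide,
        show ("ij" : String) = cellVal true 8 by decide]
    · rw [if_neg (fun hcc => h8 ((char_eq_i k hk).mp hcc.1)),
        ← cellVal_true_ne8 k hk h8,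
        show numAt true k + 1 = numAt true (k + 1) by simp [numAt]; split_ifs <;> omega]

lemma gridAt_succ (c : Bool) (F C i j : Nat) (hi : i < F) (hj : j < C) :
    gridAt c F C (i * C + j + 1)
      = pySetCell (gridAt c F C (i * C + j)) (i : Int) (j : Int) (cellVal c (i * C + j)) := by
  rw [pySetCell, PySem.List.pyGetD_natCast, PySem.List.pySetD_natCast, PySem.List.pySetD_natCast]
  have hgd : (gridAt c F C (i * C + j)).getD i []
      = (List.range C).map (fun m => if i * C + m < i * C + j then cellVal c (i * C + m) else "0") := by
    rw [List.getD_eq_getElem _ _ (by simpa [gridAt] using hi)]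
    simp [gridAt]
  rw [hgd]
  apply List.ext_getElem (by simp [gridAt])
  intro n h1 h2
  have hn : n < F := by simpa [gridAt] using h1
  simp only [gridAt, List.getElem_map, List.getElem_range, List.getElem_set]
  by_cases hni : i = n
  · subst hni
    rw [if_pos rfl]
    apply List.ext_getElem (by simp)
    intro m hm1 hm2
    have hmC : m < C := by simpa using hm1
    simp only [List.getElem_map, List.getElem_range, List.getElem_set]
    by_cases hmj : j = m
    · subst hmj
      rw [if_pos rfl, if_pos (by omega)]
    · rw [if_neg hmj]
      split_ifs <;> first | rfl | omega
  · rw [if_neg hni]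
    apply List.ext_getElem (by simp)
    intro m hm1 hm2
    have hmC : m < C := by simpa using hm1
    have hne : n * C + m ≠ i * C + j := fun h => hni (cell_inj C i j n m hj hmC h).1.symm
    simp only [List.getElem_map, List.getElem_range]
    split_ifs <;> first | rfl | omega

lemma gridAt_stable (c : Bool) (F C k : Nat) (h0 : cellVal c k = "0") :
    gridAt c F C (k + 1) = gridAt c F C k := by
  simp only [gridAt]
  refine List.map_congr_left (fun n _ => ?_)
  refine List.map_congr_left (fun m _ => ?_)
  by_cases h : n * C + m = k
  · rw [h, if_pos (by omega), if_neg (by omega), h0]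
  · split_ifs <;> first | rfl | omega

-- full per-cell invariant step
lemma step_inv (F C i j : Nat) (c : Bool) (hi : i < F) (hj : j < C)
    (hc : c = decide (((F : Int) * (C : Int)) < 26)) :
    stepA ((F : Int) * (C : Int)) (i : Int) (gridAt c F C (i * C + j), numAt c (i * C + j)) (j : Int)
      = (gridAt c F C (i * C + j + 1), numAt c (i * C + j + 1)) := by
  have hkFC : i * C + j < F * C := by
    have h1 : i * C + j < (i + 1) * C := by rw [Nat.succ_mul]; omega
    have h2 : (i + 1) * C ≤ F * C := Nat.mul_le_mul_right C hi
    omega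
  cases c with
  | true =>
    have hFC : F * C < 26 := by
      have h := of_decide_eq_true hc.symm
      exact_mod_cast (by push_cast at h ⊢; exact h : ((F * C : Nat) : Int) < 26)
    rw [stepA_eq_write _ _ _ _ true _ hc (fun _ => by omega) (fun h => nomatch h),
      gridAt_succ true F C i j hi hj]
  | false =>
    by_cases hk26 : i * C + j < 26
    · rw [stepA_eq_write _ _ _ _ false _ hc (fun h => nomatch h) (fun _ => hk26),
        gridAt_succ false F C i j hi hj]
    · have hnum : numAt false (i * C + j) = 26 := by simp [numAt]; omega
      have hnum' : numAt false (i * C + j + 1) = 26 := by simp [numAt]; omega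
      have hcell : cellVal false (i * C + j) = "0" :=
        cellVal_ge false _ (by simp [Tok]; omega)
      rw [gridAt_stable false F C _ hcell, hnum, hnum']
      simp [stepA]

lemma row_loop (F C i : Nat) (c : Bool) (hi : i < F)
    (hc : c = decide (((F : Int) * (C : Int)) < 26)) :
    ∀ (t j : Nat), j + t = C →
      (PySem.List.pyRange (j : Int) (C : Int) 1).foldl
          (fun st jj => stepA ((F : Int) * (C : Int)) (i : Int) st jj)
          (gridAt c F C (i * C + j), numAt c (i * C + j))
        = (gridAt c F C (i * C + C), numAt c (i * C + C)) := by
  intro t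
  induction t with
  | zero =>
    intro j hj
    have : j = C := by omega
    subst this
    rw [PySem.List.pyRange_one_eq_nil (le_refl _)]
    rfl
  | succ t ih =>
    intro j hj
    have hjC : j < C := by omega
    rw [PySem.List.pyRange_one_cons (show (j : Int) < (C : Int) by exact_mod_cast hjC),
      List.foldl_cons, step_inv F C i j c hi hjC hc,
      show ((j : Int) + 1) = ((j + 1 : Nat) : Int) by push_cast; ring,
      show i * C + j + 1 = i * C + (j + 1) by omega]
    exact ih (j + 1) (by omega)

lemma grid_loop (F C : Nat) (c : Bool)
    (hc : c = decide (((F : Int) * (C : Int)) < 26)) :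
    ∀ (t i : Nat), i + t = F →
      (PySem.List.pyRange (i : Int) (F : Int) 1).foldl
          (fun st ii => (PySem.List.pyRange 0 (C : Int) 1).foldl
            (fun st jj => stepA ((F : Int) * (C : Int)) ii st jj) st)
          (gridAt c F C (i * C), numAt c (i * C))
        = (gridAt c F C (F * C), numAt c (F * C)) := by
  intro t
  induction t with
  | zero =>
    intro i hi
    have : i = F := by omega
    subst this
    rw [PySem.List.pyRange_one_eq_nil (le_refl _)]
    rfl
  | succ t ih =>
    intro i hi
    have hiF : i < F := by omega
    rw [PySem.List.pyRange_one_cons (show (i : Int) < (F : Int) by exact_mod_cast hiF),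
      List.foldl_cons]
    have hrow := row_loop F C i c hiF hc C 0 (by omega)
    rw [Nat.cast_zero, Nat.add_zero] at hrow
    rw [hrow,
      show ((i : Int) + 1) = ((i + 1 : Nat) : Int) by push_cast; ring,
      show i * C + C = (i + 1) * C by ring]
    exact ih (i + 1) (by omega)

lemma A_eq (F C : Nat) :
    construeixTaula (F : Int) (C : Int)
      = gridAt (decide (((F : Int) * (C : Int)) < 26)) F C (F * C) := by
  set c := decide (((F : Int) * (C : Int)) < 26) with hc
  have hinit : ((PySem.List.pyRange 0 (F : Int) 1).map (fun _ =>
      (PySem.List.pyRange 0 (C : Int) 1).map (fun _ => "0"))) = gridAt c F C 0 := by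
    simp [gridAt, PySem.List.pyRange_zero_natCast, List.map_map, Function.comp_def, List.map_const', List.length_range]
  have hnum0 : numAt c 0 = 0 := by cases c <;> simp [numAt]
  have hmain := grid_loop F C c hc F 0 (by omega)
  rw [Nat.cast_zero, Nat.zero_mul, hnum0] at hmain
  simp only [construeixTaula]
  rw [hinit, hmain]

-- the finished grid, row by row
lemma gridAt_full (c : Bool) (F C : Nat) :
    gridAt c F C (F * C) = (List.range F).map (rowB c C) := by
  simp only [gridAt]
  refine List.map_congr_left (fun n hn => ?_)
  have hnF : n < F := List.mem_range.mp hn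
  rw [rowB, List.range'_eq_map_range, List.map_map]
  refine List.map_congr_left (fun m hm => ?_)
  have hmC : m < C := List.mem_range.mp hm
  have hcell : n * C + m < F * C := by
    have h1 : n * C + m < (n + 1) * C := by rw [Nat.succ_mul]; omega
    have h2 : (n + 1) * C ≤ F * C := Nat.mul_le_mul_right C hnF
    omega
  simp [Function.comp, hcell]

-- the padded flat sequence is cellVal, cell by cell
lemma flat_take (c : Bool) (N : Nat) :
    (Tok c ++ List.replicate N "0").take N = (List.range' 0 N).map (cellVal c) := by
  have htl : 25 ≤ (Tok c).length := by cases c <;> decide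
  apply List.ext_getElem
  · simp [List.length_take]
  · intro k h1 h2
    have hkN : k < N := by simpa [List.length_take] using h1
    rw [List.getElem_take, List.getElem_map, List.getElem_range']
    by_cases hk : k < (Tok c).length
    · rw [List.getElem_append_left hk]
      simp only [cellVal, Nat.zero_add, Nat.one_mul]
      rw [List.getD_eq_getElem _ _ hk]
    · rw [List.getElem_append_right (by omega)]
      simp only [List.getElem_replicate, Nat.zero_add, Nat.one_mul]
      rw [cellVal_ge c k (by omega)]

-- B's row-cutting loop, from row i on (state = (rows so far, offset i*C))
lemma rows_loop (F C : Nat) (c : Bool) :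
    ∀ (t i : Nat), i + t = F →
      ((PySem.List.pyRange (i : Int) (F : Int) 1).foldl
          (fun st _ =>
            (st.1 ++ [PySem.List.slice ((List.range' 0 (F * C)).map (cellVal c))
                        (some st.2) (some (st.2 + (C : Int)))],
             st.2 + (C : Int)))
          ((List.range i).map (rowB c C), ((i * C : Nat) : Int))).1
        = (List.range F).map (rowB c C) := by
  intro t
  induction t with
  | zero =>
    intro i hi
    have : i = F := by omega
    subst this
    rw [PySem.List.pyRange_one_eq_nil (le_refl _)]
    rfl
  | succ t ih =>
    intro i hi
    have hiF : i < F := by omega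
    obtain ⟨d, hd⟩ : ∃ d, F - i = d + 1 := ⟨F - i - 1, by omega⟩
    have hFC : F * C = i * C + (C + d * C) := by
      have hF : F = i + 1 + d := by omega
      rw [hF]; ring
    have hflat : (List.range' 0 (F * C)).map (cellVal c)
        = (List.range' 0 (i * C)).map (cellVal c)
          ++ ((List.range' (i * C) C).map (cellVal c)
              ++ (List.range' (i * C + C) (d * C)).map (cellVal c)) := by
      rw [← List.map_append, ← List.map_append]
      congr 1
      have e1 := List.range'_append (s := i * C) (m := C) (n := d * C) (step := 1)
      have e2 := List.range'_append (s := 0) (m := i * C) (n := C + d * C) (step := 1)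
      rw [Nat.one_mul] at e1
      rw [Nat.one_mul, Nat.zero_add] at e2
      rw [e1, e2, ← hFC]
    have hlen0 : ((List.range' 0 (i * C)).map (cellVal c)).length = i * C := by simp
    have hlen : ((List.range' (i * C) C).map (cellVal c)).length = C := by simp
    have hstep1 : PySem.List.slice ((List.range' 0 (F * C)).map (cellVal c))
          (some ((i * C : Nat) : Int)) (some (((i * C : Nat) : Int) + (C : Int)))
        = (List.range' (i * C) C).map (cellVal c) := by
      rw [PySem.List.slice_natCast_add, hflat, List.drop_left' hlen0, List.take_left' hlen]
    have hrow : (List.range i).map (rowB c C) ++ [(List.range' (i * C) C).map (cellVal c)]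
        = (List.range (i + 1)).map (rowB c C) := by
      rw [List.range_succ, List.map_append]; simp [rowB]
    rw [PySem.List.pyRange_one_cons (show (i : Int) < (F : Int) by exact_mod_cast hiF),
      List.foldl_cons]
    dsimp only
    rw [hstep1, hrow,
      show ((i * C : Nat) : Int) + (C : Int) = (((i + 1) * C : Nat) : Int) by push_cast; ring,
      show ((i : Int) + 1) = ((i + 1 : Nat) : Int) by push_cast; ring]
    exact ih (i + 1) (by omega)

lemma B_eq (F C : Nat) :
    construeixTaula_alt (F : Int) (C : Int)
      = (List.range F).map (rowB (decide (((F : Int) * (C : Int)) < 26)) C) := by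
  set c := decide (((F : Int) * (C : Int)) < 26) with hc
  have htok0 : (PySem.List.pyRange 97 123 1).map
      (fun k => String.mk [Char.ofNat k.toNat]) = Tok false := by decide
  have htokC : (Tok false).take 8 ++ ["ij"] ++ (Tok false).drop 10 = Tok true := by decide
  have htok : (if ((F : Int) * (C : Int)) < 26 then
      (Tok false).take 8 ++ ["ij"] ++ (Tok false).drop 10 else Tok false) = Tok c := by
    by_cases h : ((F : Int) * (C : Int)) < 26
    · rw [if_pos h, htokC, hc, decide_eq_true h]
    · rw [if_neg h, hc, decide_eq_false h]
  have hcells : max (F : Int) 0 * max (C : Int) 0 = ((F * C : Nat) : Int) := by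
    rw [max_eq_left (by positivity), max_eq_left (by positivity)]; push_cast; ring
  have hcellsN : (((F * C : Nat) : Int)).toNat = F * C := Int.toNat_natCast _
  simp only [construeixTaula_alt, htok0, htok, hcells, hcellsN,
    PySem.List.slice_to_natCast, flat_take]
  have hmain := rows_loop F C c F 0 (by omega)
  rw [Nat.cast_zero, Nat.zero_mul, Nat.cast_zero] at hmain
  simpa using hmain

-- degenerate columnes ≤ 0: slices of the empty flat list
lemma slice_nil {α : Type} (a b : Option Int) : PySem.List.slice ([] : List α) a b = [] := by
  simp [PySem.List.slice]

lemma foldB_nil (co : Int) (l : List Int) : ∀ (acc : List (List String)) (pos : Int),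
    (l.foldl (fun st (_ : Int) =>
        (st.1 ++ [PySem.List.slice ([] : List String) (some st.2) (some (st.2 + co))],
         st.2 + co)) (acc, pos)).1
      = acc ++ l.map (fun _ => ([] : List String)) := by
  induction l with
  | nil => intro acc pos; simp
  | cons x xs ih =>
    intro acc pos
    rw [List.foldl_cons]
    dsimp only
    rw [slice_nil, ih]
    simp

-- ===== VERDICT (by name: the statement is the Claim_ definition above) =====
theorem construeixTaula_spec : Claim_equal_construeixTaula := by
  intro files columnes _
  unfold Spec_construeixTaula
  by_cases hf : files ≤ 0
  · simp [construeixTaula, construeixTaula_alt, PySem.List.pyRange_one_eq_nil hf]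
  · by_cases hcn : columnes ≤ 0
    · have hA : construeixTaula files columnes
          = (PySem.List.pyRange 0 files 1).map (fun _ => ([] : List String)) := by
        simp [construeixTaula, PySem.List.pyRange_one_eq_nil hcn]
      have hc0 : max columnes 0 = 0 := max_eq_right hcn
      have hB : construeixTaula_alt files columnes
          = (PySem.List.pyRange 0 files 1).map (fun _ => ([] : List String)) := by
        simp only [construeixTaula_alt, hc0, mul_zero, Int.toNat_zero, List.replicate_zero,
          List.append_nil]
        rw [PySem.List.slice_to _ (le_refl 0), Int.toNat_zero, List.take_zero, foldB_nil]
        simp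
      rw [hA, hB]
    · push_neg at hf hcn
      obtain ⟨F, rfl⟩ : ∃ F : Nat, files = (F : Int) := ⟨files.toNat, (Int.toNat_of_nonneg hf.le).symm⟩
      obtain ⟨C, rfl⟩ : ∃ C : Nat, columnes = (C : Int) := ⟨columnes.toNat, (Int.toNat_of_nonneg hcn.le).symm⟩
      rw [A_eq F C, B_eq F C, gridAt_full]
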